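-- pv_equiv track=rewrite | github.com/bhushanasati25/TUF-DSA-Course | Daily Problem/Minimum Absolute Difference in Sliding Submatrix.py | minAbsDiff
-- ===== SOURCE A (Python) =====
-- def minAbsDiff(grid, k):
--     """
--     :type grid: List[List[int]]
--     :type k: int
--     :rtype: List[List[int]]
--     """
--     m = len(grid)
--     n = len(grid[0])
--     ans = [[0] * (n - k + 1) for _ in range(m - k + 1)]
--
--     for i in range(m - k + 1):
--         for j in range(n - k + 1):
--             nums = []
--             for x in range(i, i + k):
--                 for y in range(j, j + k):
--                     nums.append(grid[x][y])
--
--             nums.sort()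
--             min_diff = float('inf')
--
--             for t in range(1, len(nums)):
--                 if nums[t] != nums[t - 1]:
--                     diff = nums[t] - nums[t - 1]
--                     if diff < min_diff:
--                         min_diff = diff
--
--             if min_diff != float('inf'):
--                 ans[i][j] = min_diff
--
--     return ans
-- ===== SOURCE B (Python) =====
-- def _minpos(vals):
--     # smallest positive |a - b| over pairs taken from vals, 0 if no two values differ
--     best = 0
--     rest = vals
--     while rest:
--         a, rest = rest[0], rest[1:]
--         for b in rest:
--             if b != a:
--                 d = abs(a - b)
--                 if best == 0 or d < best:
--                     best = d
--     return best
--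
--
-- def minAbsDiff(grid, k):
--     m = len(grid)
--     n = len(grid[0])
--     out = []
--     for i in range(m - k + 1):
--         row = []
--         for j in range(n - k + 1):
--             vals = [grid[x][y] for x in range(i, i + k) for y in range(j, j + k)]
--             row.append(_minpos(vals))
--         out.append(row)
--     return out
-- ===== Notes on version B (the rewrite author's own statement) =====
-- stated objective: alternative
-- what changed: Per k-by-k window, A sorts the k^2 values and scans adjacent pairs for the minimal positive gap, writing into a preallocated zero matrix; B never sorts: it takes the minimum positive |a-b| by a direct pairwise scan with a 0 sentinel, appending rows as it goes.
import Mathlib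
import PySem

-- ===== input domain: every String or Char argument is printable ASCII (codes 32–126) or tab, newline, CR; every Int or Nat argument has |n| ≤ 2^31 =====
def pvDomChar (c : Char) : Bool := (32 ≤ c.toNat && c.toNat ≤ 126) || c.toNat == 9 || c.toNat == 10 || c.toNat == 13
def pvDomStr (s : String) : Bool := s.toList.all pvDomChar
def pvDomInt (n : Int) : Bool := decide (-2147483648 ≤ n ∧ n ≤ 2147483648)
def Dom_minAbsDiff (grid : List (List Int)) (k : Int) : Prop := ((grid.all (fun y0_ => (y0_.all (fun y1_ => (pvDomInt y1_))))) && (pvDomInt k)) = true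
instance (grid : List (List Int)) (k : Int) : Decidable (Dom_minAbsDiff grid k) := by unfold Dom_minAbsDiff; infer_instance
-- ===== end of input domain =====

-- B replaces A's per-window sort + adjacent-gap scan by a direct pairwise minimum with a 0 sentinel; same return value, no claim about speed.

-- ===== PORT A =====
def minAbsDiff (grid : List (List Int)) (k : Int) : List (List Int) :=
  let m : Int := grid.length
  let n : Int := (PySem.List.pyGetD grid 0 []).length
  let ans : List (List Int) :=
    List.replicate (m - k + 1).toNat (List.replicate (n - k + 1).toNat 0)
  (PySem.List.pyRange 0 (m - k + 1) 1).foldl (fun ans i =>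
    (PySem.List.pyRange 0 (n - k + 1) 1).foldl (fun ans j =>
      let nums : List Int :=
        (PySem.List.pyRange i (i + k) 1).foldl (fun nums x =>
          (PySem.List.pyRange j (j + k) 1).foldl (fun nums y =>
            nums ++ [PySem.List.pyGetD (PySem.List.pyGetD grid x []) y 0]) nums) []
      let nums := PySem.List.sorted nums (fun v => v) false
      let md : Option Int :=
        (PySem.List.pyRange 1 (nums.length : Int) 1).foldl (fun md t =>
          if PySem.List.pyGetD nums t 0 ≠ PySem.List.pyGetD nums (t - 1) 0 then
            let diff := PySem.List.pyGetD nums t 0 - PySem.List.pyGetD nums (t - 1) 0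
            match md with
            | none => some diff
            | some m0 => if diff < m0 then some diff else some m0
          else md) none
      match md with
      | none => ans
      | some d => ans.set i.toNat ((ans.getD i.toNat []).set j.toNat d)) ans) ans

-- ===== PORT B =====
-- Source B's _minpos: while-loop over suffixes; inner for-loop keeps the least positive |a-b| (0 = none seen yet)
def minpos : List Int → Int → Int
  | [], best => best
  | a :: rest, best =>
      minpos rest (rest.foldl (fun best b =>
        if b ≠ a then
          let d := |a - b|
          if best = 0 ∨ d < best then d else best
        else best) best)

def minAbsDiff_alt (grid : List (List Int)) (k : Int) : List (List Int) :=
  let m : Int := grid.length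
  let n : Int := (PySem.List.pyGetD grid 0 []).length
  (PySem.List.pyRange 0 (m - k + 1) 1).foldl (fun out i =>
    out ++ [(PySem.List.pyRange 0 (n - k + 1) 1).foldl (fun row j =>
      let vals : List Int :=
        (PySem.List.pyRange i (i + k) 1).flatMap (fun x =>
          (PySem.List.pyRange j (j + k) 1).map (fun y =>
            PySem.List.pyGetD (PySem.List.pyGetD grid x []) y 0))
      row ++ [minpos vals 0]) []]) []

-- ===== PRECONDITION & SPEC =====
-- Pre_ excludes exactly the inputs where Python A raises: the empty grid (grid[0] is an
-- IndexError) and, when some window is actually read (1 ≤ k ≤ m and k ≤ n), a row shorter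
-- than row 0 (grid[x][y] is an IndexError).  B raises on exactly the same inputs.
def Pre_minAbsDiff (grid : List (List Int)) (k : Int) : Prop :=
  grid ≠ [] ∧
    (1 ≤ k → k ≤ (grid.length : Int) → k ≤ ((grid.headD []).length : Int) →
      ∀ row ∈ grid, (grid.headD []).length ≤ row.length)
instance (grid : List (List Int)) (k : Int) : Decidable (Pre_minAbsDiff grid k) := by
  unfold Pre_minAbsDiff; infer_instance

def pvWitness_minAbsDiff : List (List Int) × Int := ([[1, 2], [3, 4]], 2)

def Spec_minAbsDiff (grid : List (List Int)) (k : Int) (out : List (List Int)) : Prop := out = minAbsDiff_alt grid k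
instance (grid : List (List Int)) (k : Int) (out : List (List Int)) : Decidable (Spec_minAbsDiff grid k out) := by unfold Spec_minAbsDiff; infer_instance

-- ===== CLAIM (what is proved, stated in full; the proofs are below) =====
def Claim_equal_minAbsDiff : Prop := ∀ (grid : List (List Int)) (k : Int), Dom_minAbsDiff grid k → Pre_minAbsDiff grid k → Spec_minAbsDiff grid k (minAbsDiff grid k)

-- ===== LEMMAS AND PROOFS =====

-- ---- generic helpers ----

theorem pvGetD_cons_nat {alpha : Type} (x : alpha) (l : List alpha) (k : Nat) (d : alpha) :
    PySem.List.pyGetD (x :: l) ((k : Int) + 1) d = PySem.List.pyGetD l (k : Int) d := by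
  have h : ((k : Int) + 1) = ((k + 1 : Nat) : Int) := by push_cast; ring
  rw [h, PySem.List.pyGetD_natCast, PySem.List.pyGetD_natCast]
  rfl

theorem pvRange_zero_toNat (a : Int) :
    PySem.List.pyRange 0 a 1 = PySem.List.pyRange 0 (a.toNat : Int) 1 := by
  rcases Int.lt_or_le a 0 with h | h
  · rw [PySem.List.pyRange_one_eq_nil (by omega), PySem.List.pyRange_one_eq_nil (by omega)]
  · rw [Int.toNat_of_nonneg h]

-- ---- the minimisation predicates ----

-- DJ l d: d is a positive difference of two values occurring in l
def DJ (l : List Int) (d : Int) : Prop := ∃ a ∈ l, ∃ b ∈ l, a < b ∧ d = b - a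

-- Best0 P r: r is 0 when P is empty, else the minimum of P
def Best0 (P : Int → Prop) (r : Int) : Prop :=
  (r = 0 ∧ ∀ d, ¬ P d) ∨ (P r ∧ ∀ d, P d → r ≤ d)

theorem Best0_congr {P Q : Int → Prop} {r : Int} (h : ∀ d, P d ↔ Q d) :
    Best0 P r → Best0 Q r := by
  rintro (⟨h0, hn⟩ | ⟨hp, hm⟩)
  · exact Or.inl ⟨h0, fun d hd => hn d ((h d).2 hd)⟩
  · exact Or.inr ⟨(h r).1 hp, fun d hd => hm d ((h d).2 hd)⟩

theorem Best0_unique {P : Int → Prop} {r1 r2 : Int}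
    (h1 : Best0 P r1) (h2 : Best0 P r2) : r1 = r2 := by
  rcases h1 with ⟨e1, n1⟩ | ⟨p1, m1⟩ <;> rcases h2 with ⟨e2, n2⟩ | ⟨p2, m2⟩
  · omega
  · exact absurd p2 (n1 r2)
  · exact absurd p1 (n2 r1)
  · exact le_antisymm (m1 r2 p2) (m2 r1 p1)

theorem DJ_cons (a : Int) (l : List Int) (d : Int) :
    DJ (a :: l) d ↔ (∃ b ∈ l, b ≠ a ∧ d = |a - b|) ∨ DJ l d := by
  constructor
  · rintro ⟨x, hx, y, hy, hxy, rfl⟩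
    rcases List.mem_cons.1 hx with hxa | hx
    · rcases List.mem_cons.1 hy with hya | hy
      · omega
      · refine Or.inl ⟨y, hy, by omega, ?_⟩
        subst hxa
        rw [abs_of_neg (show x - y < 0 by omega)]; ring
    · rcases List.mem_cons.1 hy with hya | hy
      · refine Or.inl ⟨x, hx, by omega, ?_⟩
        subst hya
        rw [abs_of_pos (show 0 < y - x by omega)]
      · exact Or.inr ⟨x, hx, y, hy, hxy, rfl⟩
  · rintro (⟨b, hb, hba, rfl⟩ | ⟨x, hx, y, hy, hxy, rfl⟩)
    · rcases lt_or_gt_of_ne (Ne.symm hba) with h | h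
      · refine ⟨a, List.mem_cons_self, b, List.mem_cons_of_mem _ hb, h, ?_⟩
        rw [abs_of_neg (show a - b < 0 by omega)]; ring
      · refine ⟨b, List.mem_cons_of_mem _ hb, a, List.mem_cons_self, h, ?_⟩
        rw [abs_of_pos (show 0 < a - b by omega)]
    · exact ⟨x, List.mem_cons_of_mem _ hx, y, List.mem_cons_of_mem _ hy, hxy, rfl⟩

-- ---- B side: minpos computes Best0 (DJ l) ----

theorem minpos_fold_spec (a : Int) :
    ∀ (l : List Int) (best : Int) (P : Int → Prop), Best0 P best → (∀ d, P d → 0 < d) →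
      Best0 (fun d => P d ∨ ∃ b ∈ l, b ≠ a ∧ d = |a - b|)
        (l.foldl (fun best b =>
          if b ≠ a then
            let d := |a - b|
            if best = 0 ∨ d < best then d else best
          else best) best) := by
  intro l
  induction l with
  | nil => intro best P hb _; exact Best0_congr (by simp) hb
  | cons b l ih =>
    intro best P hb hpos
    rw [List.foldl_cons]
    by_cases hba : b = a
    · have e : (if b ≠ a then
            (let d := |a - b|; if best = 0 ∨ d < best then d else best)
          else best) = best := by simp [hba]
      rw [e]
      refine Best0_congr (fun d => ?_) (ih best P hb hpos)
      constructor
      · rintro (h | ⟨c, hc, hcb, hd⟩)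
        · exact Or.inl h
        · exact Or.inr ⟨c, List.mem_cons_of_mem _ hc, hcb, hd⟩
      · rintro (h | ⟨c, hc, hcb, hd⟩)
        · exact Or.inl h
        · rcases List.mem_cons.1 hc with hcb2 | hc
          · exact absurd (hcb2.trans hba) hcb
          · exact Or.inr ⟨c, hc, hcb, hd⟩
    · have hd0 : 0 < |a - b| := abs_pos.2 (by omega)
      have e : (if b ≠ a then
            (let d := |a - b|; if best = 0 ∨ d < best then d else best)
          else best) = (if best = 0 ∨ |a - b| < best then |a - b| else best) := by
        simp [hba]
      rw [e]
      have step : Best0 (fun d => P d ∨ d = |a - b|)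
          (if best = 0 ∨ |a - b| < best then |a - b| else best) := by
        rcases hb with ⟨he, hn⟩ | ⟨hp, hm⟩
        · rw [if_pos (Or.inl he)]
          refine Or.inr ⟨Or.inr rfl, fun d hd => ?_⟩
          rcases hd with hd | hd
          · exact absurd hd (hn d)
          · omega
        · have hbest : 0 < best := hpos best hp
          by_cases hlt : |a - b| < best
          · rw [if_pos (Or.inr hlt)]
            refine Or.inr ⟨Or.inr rfl, fun d hd => ?_⟩
            rcases hd with hd | hd
            · exact le_trans (le_of_lt hlt) (hm d hd)
            · omega
          · rw [if_neg (by omega)]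
            refine Or.inr ⟨Or.inl hp, fun d hd => ?_⟩
            rcases hd with hd | hd
            · exact hm d hd
            · omega
      have hpos' : ∀ d, (P d ∨ d = |a - b|) → 0 < d := by
        rintro d (hd | rfl)
        · exact hpos d hd
        · exact hd0
      refine Best0_congr (fun d => ?_) (ih _ _ step hpos')
      constructor
      · rintro ((hd | hd) | ⟨e2, he, h3, h4⟩)
        · exact Or.inl hd
        · exact Or.inr ⟨b, List.mem_cons_self, hba, hd⟩
        · exact Or.inr ⟨e2, List.mem_cons_of_mem _ he, h3, h4⟩
      · rintro (hd | ⟨e2, he, h3, h4⟩)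
        · exact Or.inl (Or.inl hd)
        · rcases List.mem_cons.1 he with rfl | he
          · exact Or.inl (Or.inr h4)
          · exact Or.inr ⟨e2, he, h3, h4⟩

theorem minpos_spec :
    ∀ (l : List Int) (best : Int) (P : Int → Prop), Best0 P best → (∀ d, P d → 0 < d) →
      Best0 (fun d => P d ∨ DJ l d) (minpos l best) := by
  intro l
  induction l with
  | nil => intro best P hb _; exact Best0_congr (by simp [DJ]) hb
  | cons a l ih =>
    intro best P hb hpos
    show Best0 _ (minpos l _)
    have h1 := minpos_fold_spec a l best P hb hpos
    have hpos' : ∀ d, (P d ∨ ∃ b ∈ l, b ≠ a ∧ d = |a - b|) → 0 < d := by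
      rintro d (hd | ⟨b, _, hba, rfl⟩)
      · exact hpos d hd
      · exact abs_pos.2 (by omega)
    have h2 := ih _ _ h1 hpos'
    refine Best0_congr (fun d => ?_) h2
    rw [DJ_cons a l d]
    exact or_assoc

theorem minpos_best0 (l : List Int) : Best0 (DJ l) (minpos l 0) := by
  have h := minpos_spec l 0 (fun _ => False) (Or.inl ⟨rfl, by simp⟩) (by simp)
  exact Best0_congr (by simp) h

-- ---- A side: the sorted adjacent-gap scan computes the same Best0 ----

-- the body of A's min-gap loop, as a function of the two adjacent values
def fA (md : Option Int) (prev cur : Int) : Option Int :=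
  if cur ≠ prev then
    let diff := cur - prev
    match md with
    | none => some diff
    | some m0 => if diff < m0 then some diff else some m0
  else md

def pairFold : List Int → Option Int → Option Int
  | a :: b :: r, md => pairFold (b :: r) (fA md a b)
  | _, md => md

-- A's index loop over t = 1 .. len-1 is the walk over adjacent pairs
theorem foldIdxAdj :
    ∀ (s : List Int) (md : Option Int),
      (PySem.List.pyRange 1 (s.length : Int) 1).foldl
        (fun md t => fA md (PySem.List.pyGetD s (t - 1) 0) (PySem.List.pyGetD s t 0)) md
      = pairFold s md := by
  intro s
  induction s with
  | nil =>
    intro md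
    rw [PySem.List.pyRange_one_eq_nil (by simp)]
    rfl
  | cons x t ih =>
    intro md
    cases t with
    | nil =>
      rw [PySem.List.pyRange_one_eq_nil (by simp)]
      rfl
    | cons y r =>
      have hlen : ((x :: y :: r).length : Int) = ((r.length + 1 : Nat) : Int) + 1 := by
        simp
      rw [hlen, PySem.List.pyRange_one_cons (by push_cast; omega)]
      simp only [List.foldl_cons]
      have e1 : fA md (PySem.List.pyGetD (x :: y :: r) (1 - 1) 0)
          (PySem.List.pyGetD (x :: y :: r) 1 0) = fA md x y := by
        norm_num [PySem.List.pyGetD_ofNat']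
      rw [e1]
      have h2 := ih (fA md x y)
      rw [show pairFold (x :: y :: r) md = pairFold (y :: r) (fA md x y) from rfl, ← h2]
      -- both remaining folds are over ranges of the same length; shift the index
      rw [PySem.List.pyRange_one (a := 1 + 1), PySem.List.pyRange_one (a := 1)]
      have hc1 : ((((r.length + 1 : Nat) : Int) + 1) - (1 + 1)).toNat = r.length := by omega
      have hc2 : (((y :: r).length : Int) - 1).toNat = r.length := by simp
      rw [hc1, hc2, List.foldl_map, List.foldl_map]
      congr 1
      funext md' kk
      have ha1 : (1 + 1 + (kk : Int) - 1) = ((kk : Int) + 1) := by ring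
      have ha2 : (1 + 1 + (kk : Int)) = (((kk + 1 : Nat) : Int) + 1) := by push_cast; ring
      have ha3 : (1 + (kk : Int) - 1) = ((kk : Int)) := by ring
      have ha4 : (1 + (kk : Int)) = ((kk : Int) + 1) := by ring
      rw [ha1, ha2, ha3, ha4]
      simp only [pvGetD_cons_nat]
      push_cast
      simp only [pvGetD_cons_nat]

-- the same walk as a fold of plain gap candidates
def step2 (md : Option Int) (d : Int) : Option Int :=
  match md with
  | none => some d
  | some m0 => if d < m0 then some d else some m0

def adjDiffs : List Int → List Int
  | a :: b :: r => (if b ≠ a then [b - a] else []) ++ adjDiffs (b :: r)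
  | _ => []

theorem pairFold_eq_foldl_step2 :
    ∀ (s : List Int) (md : Option Int), pairFold s md = (adjDiffs s).foldl step2 md := by
  intro s
  induction s with
  | nil => intro md; rfl
  | cons x t ih =>
    intro md
    match t with
    | [] => rfl
    | y :: r =>
      show pairFold (y :: r) (fA md x y) = _
      rw [ih (fA md x y)]
      show _ = ((if y ≠ x then [y - x] else []) ++ adjDiffs (y :: r)).foldl step2 md
      rw [List.foldl_append]
      by_cases h : y = x
      · simp [h, fA]
      · have : fA md x y = step2 md (y - x) := by simp [fA, step2, h]
        simp [h, this]

theorem foldl_step2_some :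
    ∀ (l : List Int) (m0 : Int),
      ∃ r, l.foldl step2 (some m0) = some r ∧ r ≤ m0 ∧ (r = m0 ∨ r ∈ l) ∧ ∀ d ∈ l, r ≤ d := by
  intro l
  induction l with
  | nil => intro m0; exact ⟨m0, rfl, le_refl _, Or.inl rfl, by simp⟩
  | cons e l ih =>
    intro m0
    by_cases h : e < m0
    · obtain ⟨r, h1, h2, h3, h4⟩ := ih e
      refine ⟨r, ?_, by omega, ?_, ?_⟩
      · simpa [step2, h] using h1
      · rcases h3 with rfl | h3
        · exact Or.inr List.mem_cons_self
        · exact Or.inr (List.mem_cons_of_mem _ h3)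
      · intro d hd
        rcases List.mem_cons.1 hd with rfl | hd
        · omega
        · exact h4 d hd
    · obtain ⟨r, h1, h2, h3, h4⟩ := ih m0
      refine ⟨r, ?_, h2, ?_, ?_⟩
      · simpa [step2, h] using h1
      · rcases h3 with rfl | h3
        · exact Or.inl rfl
        · exact Or.inr (List.mem_cons_of_mem _ h3)
      · intro d hd
        rcases List.mem_cons.1 hd with rfl | hd
        · omega
        · exact h4 d hd

theorem foldl_step2_none (l : List Int) :
    (l = [] ∧ l.foldl step2 none = none) ∨
      ∃ r, l.foldl step2 none = some r ∧ r ∈ l ∧ ∀ d ∈ l, r ≤ d := by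
  match l with
  | [] => exact Or.inl ⟨rfl, rfl⟩
  | e :: l =>
    obtain ⟨r, h1, h2, h3, h4⟩ := foldl_step2_some l e
    refine Or.inr ⟨r, ?_, ?_, ?_⟩
    · simpa [step2] using h1
    · rcases h3 with rfl | h3
      · exact List.mem_cons_self
      · exact List.mem_cons_of_mem _ h3
    · intro d hd
      rcases List.mem_cons.1 hd with rfl | hd
      · exact h2
      · exact h4 d hd

theorem adjDiffs_mem_DJ :
    ∀ (s : List Int), s.Pairwise (· ≤ ·) → ∀ e ∈ adjDiffs s, DJ s e := by
  intro s
  induction s with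
  | nil => intro _ e he; simp [adjDiffs] at he
  | cons x t ih =>
    intro hp e he
    match t with
    | [] => simp [adjDiffs] at he
    | y :: r =>
      rcases List.pairwise_cons.1 hp with ⟨hx, hpt⟩
      rcases List.mem_append.1 he with h | h
      · have hxy : x ≤ y := hx y List.mem_cons_self
        by_cases hne : y = x
        · simp [hne] at h
        · simp only [if_pos hne] at h
          rcases List.mem_singleton.1 h with rfl
          exact ⟨x, List.mem_cons_self, y, List.mem_cons_of_mem _ List.mem_cons_self,
            by omega, rfl⟩
      · obtain ⟨a, ha, b, hb, hab, rfl⟩ := ih hpt e h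
        exact ⟨a, List.mem_cons_of_mem _ ha, b, List.mem_cons_of_mem _ hb, hab, rfl⟩

theorem DJ_le_adjDiffs :
    ∀ (s : List Int), s.Pairwise (· ≤ ·) →
      ∀ a b : Int, a ∈ s → b ∈ s → a < b → ∃ e ∈ adjDiffs s, e ≤ b - a := by
  intro s
  induction s with
  | nil => intro _ a b ha; simp at ha
  | cons x t ih =>
    intro hp a b ha hb hab
    rcases List.pairwise_cons.1 hp with ⟨hx, hpt⟩
    rcases List.mem_cons.1 ha with rfl | hat
    · rcases List.mem_cons.1 hb with rfl | hbt
      · omega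
      · -- a is the head, b is in the tail: the first gap is small enough (or heads tie)
        match t with
        | [] => simp at hbt
        | y :: r =>
          have hay : a ≤ y := hx y List.mem_cons_self
          have hyb : y ≤ b := by
            rcases List.mem_cons.1 hbt with rfl | hbr
            · exact le_refl _
            · exact (List.pairwise_cons.1 hpt).1 b hbr
          by_cases hne : y = a
          · subst hne
            obtain ⟨e, he, hle⟩ := ih hpt y b List.mem_cons_self hbt hab
            exact ⟨e, List.mem_append_right _ he, hle⟩
          · refine ⟨y - a, ?_, by omega⟩
            exact List.mem_append_left _ (by simp [hne])
    · rcases List.mem_cons.1 hb with rfl | hbt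
      · have := hx a hat; omega
      · obtain ⟨e, he, hle⟩ := ih hpt a b hat hbt hab
        match t with
        | [] => simp at hat
        | y :: r => exact ⟨e, List.mem_append_right _ he, hle⟩

theorem cellA_best0 (w : List Int) :
    Best0 (DJ w) (((adjDiffs (PySem.List.sorted w (fun v => v) false)).foldl step2 none).getD 0) := by
  set s := PySem.List.sorted w (fun v => v) false with hs
  have hpair : s.Pairwise (· ≤ ·) := by simpa using PySem.List.sorted_pairwise w (fun v => v)
  have hmem : ∀ x : Int, x ∈ s ↔ x ∈ w := fun x => PySem.List.mem_sorted w (fun v => v) false x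
  rcases foldl_step2_none (adjDiffs s) with ⟨hnil, hnone⟩ | ⟨r, hsome, hrmem, hrmin⟩
  · rw [hnone]
    refine Or.inl ⟨rfl, ?_⟩
    rintro d ⟨a, ha, b, hb, hab, rfl⟩
    obtain ⟨e, he, -⟩ := DJ_le_adjDiffs s hpair a b ((hmem a).2 ha) ((hmem b).2 hb) hab
    rw [hnil] at he
    simp at he
  · rw [hsome]
    refine Or.inr ⟨?_, ?_⟩
    · obtain ⟨a, ha, b, hb, hab, hd⟩ := adjDiffs_mem_DJ s hpair r hrmem
      exact ⟨a, (hmem a).1 ha, b, (hmem b).1 hb, hab, hd⟩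
    · rintro d ⟨a, ha, b, hb, hab, rfl⟩
      obtain ⟨e, he, hle⟩ := DJ_le_adjDiffs s hpair a b ((hmem a).2 ha) ((hmem b).2 hb) hab
      exact le_trans (hrmin e he) hle

theorem cell_eq (w : List Int) :
    ((adjDiffs (PySem.List.sorted w (fun v => v) false)).foldl step2 none).getD 0 = minpos w 0 :=
  Best0_unique (cellA_best0 w) (minpos_best0 w)

-- ---- the per-window data of the two ports ----

def numsA (grid : List (List Int)) (k i j : Int) : List Int :=
  (PySem.List.pyRange i (i + k) 1).foldl (fun nums x =>
    (PySem.List.pyRange j (j + k) 1).foldl (fun nums y =>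
      nums ++ [PySem.List.pyGetD (PySem.List.pyGetD grid x []) y 0]) nums) []

def sNums (grid : List (List Int)) (k i j : Int) : List Int :=
  PySem.List.sorted (numsA grid k i j) (fun v => v) false

def cellMd (grid : List (List Int)) (k i j : Int) : Option Int :=
  (PySem.List.pyRange 1 ((sNums grid k i j).length : Int) 1).foldl
    (fun md t => fA md (PySem.List.pyGetD (sNums grid k i j) (t - 1) 0)
      (PySem.List.pyGetD (sNums grid k i j) t 0)) none

def valsB (grid : List (List Int)) (k i j : Int) : List Int :=
  (PySem.List.pyRange i (i + k) 1).flatMap (fun x =>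
    (PySem.List.pyRange j (j + k) 1).map (fun y =>
      PySem.List.pyGetD (PySem.List.pyGetD grid x []) y 0))

theorem numsA_eq_valsB (grid : List (List Int)) (k i j : Int) :
    numsA grid k i j = valsB grid k i j := by
  unfold numsA valsB
  simp only [PySem.List.foldl_append_singleton_eq_map]
  rw [PySem.List.foldl_append_eq_flatMap]
  simp

theorem cellMd_getD_eq (grid : List (List Int)) (k i j : Int) :
    (cellMd grid k i j).getD 0 = minpos (valsB grid k i j) 0 := by
  unfold cellMd
  rw [foldIdxAdj (sNums grid k i j) none, pairFold_eq_foldl_step2]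
  rw [← numsA_eq_valsB]
  exact cell_eq (numsA grid k i j)

-- ---- the imperative raster fill of A equals a nested map ----

theorem set_getD_self {alpha : Type} (l : List alpha) (i : Nat) (d : alpha) (h : i < l.length) :
    l.set i (l.getD i d) = l := by
  rw [List.getD_eq_getElem l d h]
  exact List.set_getElem_self h

theorem getD_set_self {alpha : Type} (l : List alpha) (i : Nat) (v d : alpha) (h : i < l.length) :
    (l.set i v).getD i d = v := by
  simp [List.getD_eq_getElem?_getD, h]

theorem getD_set_ne {alpha : Type} (l : List alpha) (i j : Nat) (v d : alpha) (h : i ≠ j) :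
    (l.set i v).getD j d = l.getD j d := by
  simp [List.getD_eq_getElem?_getD, List.getElem?_set_ne h]

-- a pass that only writes row iN can be lifted out of the matrix
theorem inner_lift (g : Int → Option Int) (iN : Nat) :
    ∀ (l : List Int) (ans : List (List Int)), iN < ans.length →
      l.foldl (fun ans j =>
        match g j with
        | none => ans
        | some dd => ans.set iN ((ans.getD iN []).set j.toNat dd)) ans
      = ans.set iN (l.foldl (fun row j =>
          match g j with
          | none => row
          | some dd => row.set j.toNat dd) (ans.getD iN [])) := by
  intro l
  induction l with
  | nil =>
    intro ans h
    rw [List.foldl_nil, List.foldl_nil, set_getD_self _ _ _ h]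
  | cons j l ih =>
    intro ans h
    rw [List.foldl_cons, List.foldl_cons]
    cases hg : g j with
    | none => exact ih ans h
    | some dd =>
      show List.foldl _ (ans.set iN ((ans.getD iN []).set j.toNat dd)) l = _
      rw [ih _ (by simpa using h)]
      rw [getD_set_self _ _ _ _ h, List.set_set]

theorem matchfold_eq (g : Int → Option Int) :
    ∀ (l : List Int) (r : List Int), (∀ j ∈ l, 0 ≤ j ∧ j.toNat < r.length) →
      l.foldl (fun row j =>
        match g j with
        | none => row
        | some dd => row.set j.toNat dd) r
      = l.foldl (fun row j => row.set j.toNat ((g j).getD (row.getD j.toNat 0))) r := by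
  intro l
  induction l with
  | nil => intro r _; rfl
  | cons j l ih =>
    intro r hb
    rw [List.foldl_cons, List.foldl_cons]
    obtain ⟨hj0, hjl⟩ := hb j List.mem_cons_self
    have hrest : ∀ j' ∈ l, 0 ≤ j' ∧ j'.toNat < r.length := fun j' hj' =>
      hb j' (List.mem_cons_of_mem _ hj')
    cases hg : g j with
    | none =>
      simp only [Option.getD_none]
      rw [set_getD_self _ _ _ hjl]
      exact ih r hrest
    | some dd =>
      simp only [Option.getD_some]
      refine ih _ (fun j' hj' => ?_)
      simpa using hrest j' hj'

-- a left-to-right fold of index writes, described pointwise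
theorem setfold {alpha : Type} (dflt : alpha) (u : Int → alpha → alpha) (C : Nat) :
    ∀ (fuel a : Nat) (r : List alpha), C ≤ a + fuel → r.length = C →
      (((PySem.List.pyRange (a : Int) (C : Int) 1).foldl
          (fun r j => r.set j.toNat (u j (r.getD j.toNat dflt))) r).length = C
      ∧ ∀ jj : Nat, jj < C →
          ((PySem.List.pyRange (a : Int) (C : Int) 1).foldl
            (fun r j => r.set j.toNat (u j (r.getD j.toNat dflt))) r).getD jj dflt
          = if a ≤ jj then u (jj : Int) (r.getD jj dflt) else r.getD jj dflt) := by
  intro fuel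
  induction fuel with
  | zero =>
    intro a r hC hr
    rw [PySem.List.pyRange_one_eq_nil (by omega)]
    exact ⟨hr, fun jj hjj => by rw [List.foldl_nil, if_neg (by omega)]⟩
  | succ fuel ih =>
    intro a r hC hr
    by_cases hac : C ≤ a
    · rw [PySem.List.pyRange_one_eq_nil (by omega)]
      exact ⟨hr, fun jj hjj => by rw [List.foldl_nil, if_neg (by omega)]⟩
    · rw [PySem.List.pyRange_one_cons (by omega : (a : Int) < (C : Int)), List.foldl_cons]
      have hcast : ((a : Int) + 1) = ((a + 1 : Nat) : Int) := by push_cast; ring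
      have ha' : ((a : Int)).toNat = a := Int.toNat_natCast a
      rw [hcast]
      obtain ⟨hl, hp⟩ := ih (a + 1)
        (r.set ((a : Int)).toNat (u (a : Int) (r.getD ((a : Int)).toNat dflt)))
        (by omega) (by simpa using hr)
      refine ⟨hl, fun jj hjj => ?_⟩
      rw [hp jj hjj]
      by_cases h1 : a + 1 ≤ jj
      · rw [if_pos h1, if_pos (by omega : a ≤ jj), ha',
          getD_set_ne _ _ _ _ _ (by omega)]
      · rw [if_neg h1]
        by_cases h2 : a ≤ jj
        · have hja : jj = a := by omega
          subst hja
          rw [if_pos h2, ha', getD_set_self _ _ _ _ (by omega)]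
        · rw [if_neg h2, ha', getD_set_ne _ _ _ _ _ (by omega)]

theorem rowfold_eq (g : Int → Option Int) (C : Nat) :
    (PySem.List.pyRange 0 (C : Int) 1).foldl
      (fun row j =>
        match g j with
        | none => row
        | some dd => row.set j.toNat dd)
      (List.replicate C (0 : Int))
    = (PySem.List.pyRange 0 (C : Int) 1).map (fun j => (g j).getD 0) := by
  rw [matchfold_eq g _ _ (fun j hj => by
    obtain ⟨h0, h1⟩ := PySem.List.mem_pyRange_one.1 hj
    constructor
    · exact h0
    · simp; omega)]
  obtain ⟨hl, hp⟩ := setfold (0 : Int) (fun j x => (g j).getD x) C C 0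
    (List.replicate C 0) (by omega) (by simp)
  simp only [Nat.cast_zero] at hl hp
  apply List.ext_getElem
  · rw [hl]
    simp [PySem.List.length_pyRange_one]
  · intro nn h1 h2
    have hn : nn < C := by rw [hl] at h1; exact h1
    have hh := hp nn hn
    rw [if_pos (Nat.zero_le nn)] at hh
    rw [← List.getD_eq_getElem _ 0 h1, hh, List.getElem_map,
      PySem.List.getElem_pyRange_one]
    have : (List.replicate C (0 : Int)).getD nn 0 = 0 := by
      simp [List.getD_eq_getElem?_getD, hn]
    rw [this, zero_add]

theorem outer_convert (H : Int → Int → Option Int) (C : Nat) :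
    ∀ (l : List Int) (ans : List (List Int)), (∀ i ∈ l, 0 ≤ i ∧ i.toNat < ans.length) →
      l.foldl (fun ans i =>
        (PySem.List.pyRange 0 (C : Int) 1).foldl (fun ans j =>
          match H i j with
          | none => ans
          | some dd => ans.set i.toNat ((ans.getD i.toNat []).set j.toNat dd)) ans) ans
      = l.foldl (fun ans i => ans.set i.toNat
          ((PySem.List.pyRange 0 (C : Int) 1).foldl (fun row j =>
            match H i j with
            | none => row
            | some dd => row.set j.toNat dd) (ans.getD i.toNat []))) ans := by
  intro l
  induction l with
  | nil => intro ans _; rfl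
  | cons i l ih =>
    intro ans hb
    rw [List.foldl_cons, List.foldl_cons]
    obtain ⟨hi0, hil⟩ := hb i List.mem_cons_self
    rw [inner_lift (H i) i.toNat _ ans hil]
    refine ih _ (fun i' hi' => ?_)
    have := hb i' (List.mem_cons_of_mem _ hi')
    simpa using this

theorem Afold_eq_map (H : Int → Int → Option Int) (R C : Nat) :
    (PySem.List.pyRange 0 (R : Int) 1).foldl (fun ans i =>
      (PySem.List.pyRange 0 (C : Int) 1).foldl (fun ans j =>
        match H i j with
        | none => ans
        | some dd => ans.set i.toNat ((ans.getD i.toNat []).set j.toNat dd)) ans)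
      (List.replicate R (List.replicate C 0))
    = (PySem.List.pyRange 0 (R : Int) 1).map (fun i =>
        (PySem.List.pyRange 0 (C : Int) 1).map (fun j => (H i j).getD 0)) := by
  rw [outer_convert H C _ _ (fun i hi => by
    obtain ⟨h0, h1⟩ := PySem.List.mem_pyRange_one.1 hi
    constructor
    · exact h0
    · simp; omega)]
  obtain ⟨hl, hp⟩ := setfold ([] : List Int)
    (fun i row => (PySem.List.pyRange 0 (C : Int) 1).foldl (fun row j =>
      match H i j with
      | none => row
      | some dd => row.set j.toNat dd) row) R R 0
    (List.replicate R (List.replicate C 0)) (by omega) (by simp)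
  simp only [Nat.cast_zero] at hl hp
  apply List.ext_getElem
  · rw [hl]
    simp [PySem.List.length_pyRange_one]
  · intro nn h1 h2
    have hn : nn < R := by rw [hl] at h1; exact h1
    have hh := hp nn hn
    rw [if_pos (Nat.zero_le nn)] at hh
    have hrep : (List.replicate R (List.replicate C (0 : Int))).getD nn [] = List.replicate C 0 := by
      simp [List.getD_eq_getElem?_getD, hn]
    rw [hrep] at hh
    rw [← List.getD_eq_getElem _ [] h1, hh, List.getElem_map,
      PySem.List.getElem_pyRange_one, zero_add, rowfold_eq]

-- ---- assembling the two ports ----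

theorem ports_eq (grid : List (List Int)) (k : Int) :
    minAbsDiff grid k = minAbsDiff_alt grid k := by
  have eA : minAbsDiff grid k
      = (PySem.List.pyRange 0 ((grid.length : Int) - k + 1) 1).foldl (fun ans i =>
          (PySem.List.pyRange 0 (((PySem.List.pyGetD grid 0 []).length : Int) - k + 1) 1).foldl
            (fun ans j =>
              match cellMd grid k i j with
              | none => ans
              | some dd => ans.set i.toNat ((ans.getD i.toNat []).set j.toNat dd)) ans)
          (List.replicate ((grid.length : Int) - k + 1).toNat
            (List.replicate (((PySem.List.pyGetD grid 0 []).length : Int) - k + 1).toNat 0)) := rfl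
  have eB : minAbsDiff_alt grid k
      = (PySem.List.pyRange 0 ((grid.length : Int) - k + 1) 1).foldl (fun out i =>
          out ++ [(PySem.List.pyRange 0 (((PySem.List.pyGetD grid 0 []).length : Int) - k + 1) 1).foldl
            (fun row j => row ++ [minpos (valsB grid k i j) 0]) []]) [] := rfl
  rw [eA, eB]
  simp only [PySem.List.foldl_append_singleton_eq_map, List.nil_append]
  rw [pvRange_zero_toNat ((grid.length : Int) - k + 1),
    pvRange_zero_toNat (((PySem.List.pyGetD grid 0 []).length : Int) - k + 1)]
  rw [Afold_eq_map]
  refine List.map_congr_left (fun i _ => ?_)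
  refine List.map_congr_left (fun j _ => ?_)
  exact cellMd_getD_eq grid k i j

-- ===== VERDICT (by name: the statement is the Claim_ definition above) =====
theorem minAbsDiff_spec : Claim_equal_minAbsDiff := by
  intro grid k _ _
  show minAbsDiff grid k = minAbsDiff_alt grid k
  exact ports_eq grid k
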